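-- pv_equiv track=rewrite | github.com/Roger-jc-Lu/web_scraping_assessment | Q2.py | mask_repetitive_char
-- ===== SOURCE A (Python) =====
-- from collections import deque
--
-- def mask_repetitive_char(s, k):
--     res = ""
--     window = deque()
--     seen = set()
--     for char in s:
--         if char in seen:
--             res += '-'
--         else:
--             res += char
--             seen.add(char)
--
--         window.append(char)
--
--         if len(window) > k:
--             least_recent = window.popleft()
--             if least_recent not in window:
--                 seen.remove(least_recent)
--
--     return res
-- ===== SOURCE B (Python) =====
-- def mask_repetitive_char(s, k):
--     # stateless: a char is masked iff it occurs among the previous k characters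
--     return ''.join('-' if c in s[max(0, i - k):i] else c for i, c in enumerate(s))
-- ===== Notes on version B (the rewrite author's own statement) =====
-- stated objective: simpler
-- what changed: Replaces A's stateful sliding window (deque + set maintained with append/popleft/membership-prune) by a stateless one-liner: each character is checked directly against the slice of the previous k characters, so no window state is carried at all.
import Mathlib
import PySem

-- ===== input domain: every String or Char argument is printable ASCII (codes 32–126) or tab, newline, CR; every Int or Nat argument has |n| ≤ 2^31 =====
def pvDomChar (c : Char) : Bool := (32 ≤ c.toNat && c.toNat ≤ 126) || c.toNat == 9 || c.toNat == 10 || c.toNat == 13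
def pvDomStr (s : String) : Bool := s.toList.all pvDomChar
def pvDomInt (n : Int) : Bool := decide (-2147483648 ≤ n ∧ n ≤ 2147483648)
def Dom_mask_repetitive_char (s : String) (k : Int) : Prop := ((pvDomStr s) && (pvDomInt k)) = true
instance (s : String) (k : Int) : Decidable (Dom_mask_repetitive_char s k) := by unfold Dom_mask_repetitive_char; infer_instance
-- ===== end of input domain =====

-- B drops A's deque + set state entirely: each character is compared against the slice of the
-- previous k characters directly, a stateless per-index check (objective: simpler).

-- ===== PORT A =====
-- one loop iteration of A: state = (res, window, seen)
def maskAStep (k : Int) (st : List Char × List Char × PySem.Set Char) (char : Char) :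
    List Char × List Char × PySem.Set Char :=
  let res := st.1
  let window := st.2.1
  let seen := st.2.2
  let rs := if PySem.Set.contains seen char then (res ++ ['-'], seen)
            else (res ++ [char], PySem.Set.add seen char)
  let res := rs.1
  let seen := rs.2
  let window := window ++ [char]
  if PySem.List.len window > k then
    match window with
    | [] => (res, [], seen)  -- unreachable: popleft on a deque that was just appended to
    | least_recent :: window' =>
      let seen := if window'.contains least_recent then seen
                  else (PySem.Set.remove? seen least_recent).getD seen  -- seen.remove; KeyError is unreachable
      (res, window', seen)
  else (res, window, seen)

def mask_repetitive_char (s : String) (k : Int) : String :=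
  String.ofList ((s.toList.foldl (maskAStep k) ([], [], PySem.Set.empty)).1)

-- ===== PORT B =====
-- ''.join('-' if c in s[max(0, i - k):i] else c for i, c in enumerate(s)); the 1-character
-- needle makes Python's substring test 'c in …' exact as PySem.Chars.isIn [c] (…)
def mask_repetitive_char_alt (s : String) (k : Int) : String :=
  String.ofList ((PySem.List.enumerate s.toList 0).map (fun ic =>
    if PySem.Chars.isIn [ic.2]
        (PySem.Str.slice s (some (max 0 (ic.1 - k))) (some ic.1)).toList
    then '-' else ic.2))

-- ===== PRECONDITION & SPEC =====
def Spec_mask_repetitive_char (s : String) (k : Int) (out : String) : Prop := out = mask_repetitive_char_alt s k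
instance (s : String) (k : Int) (out : String) : Decidable (Spec_mask_repetitive_char s k out) := by unfold Spec_mask_repetitive_char; infer_instance

-- ===== CLAIM (what is proved, stated in full; the proofs are below) =====
def Claim_equal_mask_repetitive_char : Prop := ∀ (s : String) (k : Int), Dom_mask_repetitive_char s k → Spec_mask_repetitive_char s k (mask_repetitive_char s k)

-- ===== LEMMAS AND PROOFS =====

-- A's window before processing index i is the last min(i, max(k,0)) characters already read
def pvWin (w : Nat) (pre : List Char) : List Char := pre.drop (pre.length - w)

lemma pv_isIn_singleton (a : Char) (l : List Char) :
    PySem.Chars.isIn [a] l = l.contains a := by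
  rw [Bool.eq_iff_iff]
  rw [show PySem.Chars.isIn [a] l = PySem.Str.isIn (String.ofList [a]) (String.ofList l) from by
    simp [PySem.Str.isIn]]
  rw [PySem.Str.isIn_iff_infix]
  simp only [String.toList_ofList, List.contains_eq_mem, decide_eq_true_eq]
  constructor
  · intro h
    exact h.sublist.subset (List.mem_singleton_self a)
  · intro h
    obtain ⟨u, v, rfl⟩ := List.append_of_mem h
    exact ⟨u, v, by simp⟩

lemma pv_slice_win (s : String) (k : Int) (pre rest : List Char)
    (h : s.toList = pre ++ rest) :
    (PySem.Str.slice s (some (max 0 ((pre.length : Int) - k))) (some (pre.length : Int))).toList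
      = pvWin k.toNat pre := by
  have hb : (0:Int) ≤ (pre.length : Int) := by positivity
  have hbridge : (PySem.Str.slice s (some (max 0 ((pre.length : Int) - k))) (some (pre.length : Int))).toList
      = PySem.List.slice s.toList (some (max 0 ((pre.length : Int) - k))) (some (pre.length : Int)) := by
    simp [PySem.Str.slice]
  rw [hbridge, h, PySem.List.slice_toNat (pre ++ rest) (le_max_left 0 ((pre.length : Int) - k)) hb]
  by_cases hk : 0 < k
  · have ha : (max 0 ((pre.length : Int) - k)).toNat = pre.length - k.toNat := by omega
    have hle : pre.length - k.toNat ≤ pre.length := by omega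
    rw [ha]
    rw [List.drop_append_of_le_length hle]
    have hlen : (pre.drop (pre.length - k.toNat)).length = pre.length - (pre.length - k.toNat) := by
      simp
    rw [show (pre.length : Int).toNat - (pre.length - k.toNat) = (pre.drop (pre.length - k.toNat)).length by
      rw [hlen]; omega]
    rw [List.take_left]
    rfl
  · have ha : pre.length ≤ (max 0 ((pre.length : Int) - k)).toNat := by omega
    have h0 : (pre.length : Int).toNat - (max 0 ((pre.length : Int) - k)).toNat = 0 := by omega
    rw [h0, List.take_zero, pvWin]
    rw [show k.toNat = 0 by omega]
    simp

lemma pv_loop (s : String) (k : Int) :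
    ∀ (rest pre res win : List Char) (seen : PySem.Set Char),
    s.toList = pre ++ rest →
    win = pvWin k.toNat pre →
    List.Nodup seen →
    (∀ y, y ∈ seen ↔ y ∈ win) →
    (rest.foldl (maskAStep k) (res, win, seen)).1
      = res ++ (PySem.List.enumerate rest (pre.length : Int)).map
          (fun ic => if PySem.Chars.isIn [ic.2]
              (PySem.Str.slice s (some (max 0 (ic.1 - k))) (some ic.1)).toList
            then '-' else ic.2) := by
  intro rest
  induction rest with
  | nil => intro pre res win seen _ _ _ _; simp [PySem.List.enumerate_nil]
  | cons c rest' ih =>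
    intro pre res win seen hs hwin hnd hseen
    rw [PySem.List.enumerate_cons, List.foldl_cons, List.map_cons]
    have hs' : s.toList = (pre ++ [c]) ++ rest' := by simpa using hs
    have hwl : win.length = pre.length - (pre.length - k.toNat) := by rw [hwin]; simp [pvWin]
    -- the head decision: A's 'char in seen' = B's 'c in s[max(0,i-k):i]'
    have hdec : (if PySem.Chars.isIn [c]
          (PySem.Str.slice s (some (max 0 ((pre.length : Int) - k))) (some (pre.length : Int))).toList
        then '-' else c)
        = (if PySem.Set.contains seen c then '-' else c) := by
      rw [pv_isIn_singleton, pv_slice_win s k pre (c :: rest') hs, ← hwin]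
      by_cases hc : c ∈ win
      · rw [if_pos (by simpa using hc), if_pos (by simpa [PySem.Set.contains] using (hseen c).2 hc)]
      · rw [if_neg (by simpa using hc), if_neg (by simpa [PySem.Set.contains] using fun h => hc ((hseen c).1 h))]
    have hproj1 : (if PySem.Set.contains seen c then (res ++ ['-'], seen) else (res ++ [c], seen.add c)).1
        = res ++ [if PySem.Set.contains seen c then '-' else c] := by split <;> rfl
    have hproj2 : (if PySem.Set.contains seen c then (res ++ ['-'], seen) else (res ++ [c], seen.add c)).2
        = (if PySem.Set.contains seen c then seen else seen.add c) := by split <;> rfl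
    have hS1mem : ∀ y, y ∈ (if PySem.Set.contains seen c then seen else seen.add c) ↔ y ∈ win ++ [c] := by
      intro y
      by_cases hcs : c ∈ seen
      · rw [if_pos (by simpa [PySem.Set.contains] using hcs)]
        rw [hseen y, List.mem_append, List.mem_singleton]
        exact ⟨Or.inl, fun h => h.elim id (fun hy => hy ▸ (hseen c).1 hcs)⟩
      · rw [if_neg (by simpa [PySem.Set.contains] using hcs)]
        rw [PySem.Set.mem_add, hseen y, List.mem_append, List.mem_singleton]
    have hS1nd : (if PySem.Set.contains seen c then seen else seen.add c).Nodup := by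
      split
      · exact hnd
      · exact PySem.Set.nodup_add seen c hnd
    have hlen1 : ((pre ++ [c]).length : Int) = (pre.length : Int) + 1 := by simp
    by_cases hpop : (PySem.List.len (win ++ [c]) > k)
    · -- the window overflows: A pops least_recent and prunes seen
      have hPW : k.toNat ≤ pre.length := by
        rw [PySem.List.len_eq] at hpop
        simp only [List.length_append, List.length_cons, List.length_nil] at hpop
        omega
      obtain ⟨lr, tl, hsplit⟩ := List.exists_cons_of_ne_nil (l := win ++ [c]) (by simp)
      have hdrop : win ++ [c] = (pre ++ [c]).drop (pre.length - k.toNat) := by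
        rw [hwin, pvWin, List.drop_append_of_le_length (by omega)]
      have htl : tl = pvWin k.toNat (pre ++ [c]) := by
        have h1 : tl = (win ++ [c]).tail := by rw [hsplit]; rfl
        rw [h1, hdrop, List.tail_drop, pvWin]
        congr 1
        simp
        omega
      have hlrmem : lr ∈ win ++ [c] := by rw [hsplit]; exact List.mem_cons_self
      have hlrS1 : lr ∈ (if PySem.Set.contains seen c then seen else seen.add c) :=
        (hS1mem lr).2 hlrmem
      have hseen2 : ∀ y, (y ∈ if tl.contains lr = true then (if PySem.Set.contains seen c then seen else seen.add c)
          else ((if PySem.Set.contains seen c then seen else seen.add c).remove? lr).getD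
            (if PySem.Set.contains seen c then seen else seen.add c)) ↔ y ∈ tl := by
        intro y
        have hy1 : y ∈ (if PySem.Set.contains seen c then seen else seen.add c) ↔ y ∈ lr :: tl := by
          rw [hS1mem y, hsplit]
        by_cases htlc : tl.contains lr = true
        · rw [if_pos htlc, hy1, List.mem_cons]
          have hlrtl : lr ∈ tl := by simpa using htlc
          exact ⟨fun h => h.elim (fun hy => hy ▸ hlrtl) id, Or.inr⟩
        · rw [if_neg htlc, PySem.Set.remove?_of_mem hlrS1, Option.getD_some,
              PySem.Set.mem_discard, hy1, List.mem_cons]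
          have hlrtl : lr ∉ tl := by simpa using htlc
          constructor
          · rintro ⟨h | h, hne⟩
            · exact absurd h hne
            · exact h
          · exact fun h => ⟨Or.inr h, fun hy => hlrtl (hy ▸ h)⟩
      have hnd2 : (if tl.contains lr = true then (if PySem.Set.contains seen c then seen else seen.add c)
          else ((if PySem.Set.contains seen c then seen else seen.add c).remove? lr).getD
            (if PySem.Set.contains seen c then seen else seen.add c)).Nodup := by
        by_cases htlc : tl.contains lr = true
        · rw [if_pos htlc]; exact hS1nd
        · rw [if_neg htlc, PySem.Set.remove?_of_mem hlrS1, Option.getD_some]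
          exact PySem.Set.nodup_discard _ _ hS1nd
      simp only [maskAStep]
      rw [hproj1, hproj2, if_pos hpop, hsplit]
      dsimp only
      rw [ih (pre ++ [c]) _ tl _ hs' htl hnd2 hseen2, hdec, hlen1]
      simp
    · -- the window is not full yet: nothing leaves
      have hwin2 : win ++ [c] = pvWin k.toNat (pre ++ [c]) := by
        have hPW : pre.length < k.toNat := by
          rw [PySem.List.len_eq] at hpop
          simp only [List.length_append, List.length_cons, List.length_nil] at hpop
          omega
        rw [hwin, pvWin, pvWin]
        have h0 : pre.length - k.toNat = 0 := by omega
        have h1 : (pre ++ [c]).length - k.toNat = 0 := by simp; omega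
        rw [h0, h1, List.drop_zero, List.drop_zero]
      simp only [maskAStep]
      rw [hproj1, hproj2, if_neg hpop]
      rw [ih (pre ++ [c]) _ (win ++ [c]) _ hs' hwin2 hS1nd hS1mem, hdec, hlen1]
      simp

-- ===== VERDICT (by name: the statement is the Claim_ definition above) =====
theorem mask_repetitive_char_spec : Claim_equal_mask_repetitive_char := by
  intro s k _
  unfold Spec_mask_repetitive_char mask_repetitive_char mask_repetitive_char_alt
  have h := pv_loop s k s.toList [] [] [] PySem.Set.empty
    (by simp) (by simp [pvWin]) (by simp [PySem.Set.empty]) (by simp [PySem.Set.empty])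
  simpa using congrArg String.ofList h
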